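-- pv_equiv track=rewrite | github.com/Migorithm/Algorithm | Algorithm_70_short_budget.py | solution
-- ===== SOURCE A (Python) =====
-- def solution(price, money, count):
--     money = money
--     for i in range(1,count+1):
--         money -= i*price
--     if money < 0:
--         return abs(money)
--     else:
--         return 0
-- ===== SOURCE B (Python) =====
-- def solution(price, money, count):
--     n = count if count > 0 else 0
--     total = price * n * (n + 1) // 2
--     shortfall = total - money
--     return shortfall if shortfall > 0 else 0
-- ===== Notes on version B (the rewrite author's own statement) =====
-- stated objective: faster
-- what changed: Replaces the O(count) loop subtracting i*price with the closed-form arithmetic-series total price*n*(n+1)//2 and a single max with 0.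
import Mathlib
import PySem

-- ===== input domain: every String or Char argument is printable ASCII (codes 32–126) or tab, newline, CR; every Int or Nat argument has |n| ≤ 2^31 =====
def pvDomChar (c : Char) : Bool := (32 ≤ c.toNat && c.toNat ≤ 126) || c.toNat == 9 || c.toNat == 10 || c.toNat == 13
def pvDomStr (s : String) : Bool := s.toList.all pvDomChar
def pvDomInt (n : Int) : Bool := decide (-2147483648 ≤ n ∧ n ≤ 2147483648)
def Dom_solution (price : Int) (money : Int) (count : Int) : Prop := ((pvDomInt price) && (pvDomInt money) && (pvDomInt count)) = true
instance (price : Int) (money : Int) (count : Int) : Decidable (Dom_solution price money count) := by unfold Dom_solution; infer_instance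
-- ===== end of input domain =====

-- B replaces A's O(count) subtraction loop by the closed-form series total price*n*(n+1)//2 (O(1)).

-- ===== PORT A =====
def solution (price : Int) (money : Int) (count : Int) : Int :=
  let money := (PySem.List.pyRange 1 (count + 1) 1).foldl (fun m i => m - i * price) money
  if money < 0 then |money| else 0

-- ===== PORT B =====
def solution_alt (price : Int) (money : Int) (count : Int) : Int :=
  let n : Int := if count > 0 then count else 0
  let total := PySem.Int.floordiv (price * n * (n + 1)) 2
  let shortfall := total - money
  if shortfall > 0 then shortfall else 0

-- ===== PRECONDITION & SPEC =====
def Spec_solution (price : Int) (money : Int) (count : Int) (out : Int) : Prop := out = solution_alt price money count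
instance (price : Int) (money : Int) (count : Int) (out : Int) : Decidable (Spec_solution price money count out) := by unfold Spec_solution; infer_instance

-- ===== CLAIM (what is proved, stated in full; the proofs are below) =====
def Claim_equal_solution : Prop := ∀ (price : Int) (money : Int) (count : Int), Dom_solution price money count → Spec_solution price money count (solution price money count)

-- ===== LEMMAS AND PROOFS =====

-- Gauss triangle number as a recursion, used only by the proofs.
def pvTri : Nat → Int
  | 0 => 0
  | n + 1 => pvTri n + (n + 1)

theorem pvTri_two_mul (n : Nat) : 2 * pvTri n = (n : Int) * (n + 1) := by
  induction n with
  | zero => simp [pvTri]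
  | succ k ih => simp [pvTri]; ring_nf; push_cast at ih; linarith

theorem pv_loop (price : Int) (n : Nat) (m : Int) :
    (PySem.List.pyRange 1 ((n : Int) + 1) 1).foldl (fun m i => m - i * price) m
      = m - price * pvTri n := by
  induction n generalizing m with
  | zero => simp [PySem.List.pyRange_one_eq_nil, pvTri]
  | succ k ih =>
      rw [show ((k + 1 : Nat) : Int) + 1 = ((k : Int) + 1) + 1 by push_cast; ring,
        PySem.List.pyRange_one_succ_right (by omega)]
      rw [List.foldl_append, ih]
      simp [pvTri]; ring

theorem pv_total (price : Int) (n : Nat) :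
    PySem.Int.floordiv (price * (n : Int) * ((n : Int) + 1)) 2 = price * pvTri n := by
  rw [PySem.Int.floordiv_eq_ediv_of_pos (by norm_num)]
  have h : price * (n : Int) * ((n : Int) + 1) = price * pvTri n * 2 := by
    rw [mul_assoc, ← pvTri_two_mul n]; ring
  rw [h, Int.mul_ediv_cancel _ (by norm_num)]

-- ===== VERDICT (by name: the statement is the Claim_ definition above) =====
theorem solution_spec : Claim_equal_solution := by
  intro price money count _
  unfold Spec_solution solution solution_alt
  by_cases hc : count > 0
  · obtain ⟨n, rfl⟩ : ∃ n : Nat, count = (n : Int) := ⟨count.toNat, (Int.toNat_of_nonneg (le_of_lt hc)).symm⟩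
    simp only [hc, if_pos]
    rw [pv_loop, pv_total]
    have : money - price * pvTri n < 0 ↔ price * pvTri n - money > 0 := by omega
    rcases Int.lt_or_le (money - price * pvTri n) 0 with h | h
    · rw [if_pos h, if_pos (by omega), abs_of_neg h]; ring
    · rw [if_neg (not_lt.mpr h), if_neg (by omega)]
  · rw [if_neg hc, PySem.List.pyRange_one_eq_nil (by omega)]
    simp only [List.foldl_nil, mul_zero, zero_mul]
    rw [show PySem.Int.floordiv 0 2 = 0 by decide]
    rcases Int.lt_or_le money 0 with h | h
    · rw [if_pos h, if_pos (by omega), abs_of_neg h]; ring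
    · rw [if_neg (not_lt.mpr h), if_neg (by omega)]
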